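-- pv_equiv track=rewrite | github.com/alper-a1/pico-raycaster | temptex.py | format_cpp_array
-- ===== SOURCE A (Python) =====
-- def format_cpp_array(name, pixels):
--     """
--     Formats the array string with specific constraints.
--     """
--     out = [f"// Texture: {name} (Column Major, Big Endian)"]
--     # Explicit definition format requested
--     out.append(f"alignas(4) static constexpr uint16_t {name}[4096] = {{")
--
--     # Print formatted rows
--     row_str = []
--     for i, val in enumerate(pixels):
--         row_str.append(f"0x{val:04X}")
--
--         # New line every 16 elements for readability
--         if (i + 1) % 16 == 0:
--             out.append("    " + ", ".join(row_str) + ",")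
--             row_str = []
--
--     out.append("};")
--     return "\n".join(out)
-- ===== SOURCE B (Python) =====
-- def format_cpp_array(name, pixels):
--     header = [f"// Texture: {name} (Column Major, Big Endian)",
--               f"alignas(4) static constexpr uint16_t {name}[4096] = {{"]
--     # emit only complete 16-element chunks, exactly as the original does
--     rows = ["    " + ", ".join(f"0x{v:04X}" for v in pixels[i:i + 16]) + ","
--             for i in range(0, (len(pixels) // 16) * 16, 16)]
--     return "\n".join(header + rows + ["};"])
-- ===== Notes on version B (the rewrite author's own statement) =====
-- stated objective: simpler
-- what changed: Replaces the element-by-element enumerate loop with its row accumulator and modulo-16 flush by a direct comprehension over chunk start indices that slices each complete 16-element row out of the list.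
import Mathlib
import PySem

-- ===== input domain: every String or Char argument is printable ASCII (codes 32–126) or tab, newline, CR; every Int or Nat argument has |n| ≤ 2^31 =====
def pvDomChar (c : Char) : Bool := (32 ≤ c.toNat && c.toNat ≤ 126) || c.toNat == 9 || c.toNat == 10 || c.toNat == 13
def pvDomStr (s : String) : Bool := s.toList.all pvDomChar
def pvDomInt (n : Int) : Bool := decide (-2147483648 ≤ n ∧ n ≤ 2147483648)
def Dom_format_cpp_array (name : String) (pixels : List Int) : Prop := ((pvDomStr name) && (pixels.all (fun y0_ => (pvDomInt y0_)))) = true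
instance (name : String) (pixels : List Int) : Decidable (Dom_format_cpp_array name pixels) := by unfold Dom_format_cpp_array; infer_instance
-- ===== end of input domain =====

-- B replaces A's enumerate loop with a row accumulator flushed every 16 elements
-- by a comprehension over chunk start indices that slices each complete 16-element row (objective: simpler).


-- ===== PORT A =====
-- shared helper: upper-case hex digits of a natural number (most significant first)
def pvHexChars (n : Nat) : List Char :=
  if _h : n < 16 then [(List.getD ['0','1','2','3','4','5','6','7','8','9','A','B','C','D','E','F'] n '0')]
  else pvHexChars (n / 16) ++ [(List.getD ['0','1','2','3','4','5','6','7','8','9','A','B','C','D','E','F'] (n % 16) '0')]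
  termination_by n
  decreasing_by exact Nat.div_lt_self (by omega) (by omega)

-- shared helper: f"0x{v:04X}" (Python zero-pads the SIGNED digit string to width 4)
def pvFmt04X (v : Int) : String :=
  "0x" ++ PySem.Str.zfill ((if v < 0 then "-" else "") ++ String.ofList (pvHexChars v.natAbs)) 4

-- shared helper: "    " + ", ".join(row) + ","
def pvRowLine (row : List String) : String := "    " ++ PySem.Str.join ", " row ++ ","

-- one iteration of A's loop body: append the value to row_str, flush every 16th element
def pvStepA (st : List String × List String) (iv : Int × Int) : List String × List String :=
  let row := st.2 ++ [pvFmt04X iv.2]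
  if PySem.Int.mod (iv.1 + 1) 16 = 0 then (st.1 ++ [pvRowLine row], []) else (st.1, row)

def format_cpp_array (name : String) (pixels : List Int) : String :=
  -- out = [header]; out.append(definition line); for i, val in enumerate(pixels): pvStepA; out.append("};")
  PySem.Str.join "\n"
    (((PySem.List.enumerate pixels 0).foldl pvStepA
        (["// Texture: " ++ name ++ " (Column Major, Big Endian)"] ++
         ["alignas(4) static constexpr uint16_t " ++ name ++ "[4096] = {"], [])).1
      ++ ["};"])

-- ===== PORT B =====
def format_cpp_array_alt (name : String) (pixels : List Int) : String :=
  PySem.Str.join "\n"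
    (["// Texture: " ++ name ++ " (Column Major, Big Endian)",
      "alignas(4) static constexpr uint16_t " ++ name ++ "[4096] = {"] ++
     -- one line per complete 16-element chunk, sliced straight out of pixels
     (PySem.List.pyRange 0 (16 * PySem.Int.floordiv (pixels.length : Int) 16) 16).map
        (fun i => pvRowLine ((PySem.List.slice pixels (some i) (some (i + 16))).map pvFmt04X)) ++
     ["};"])

-- ===== PRECONDITION & SPEC =====
def Spec_format_cpp_array (name : String) (pixels : List Int) (out : String) : Prop := out = format_cpp_array_alt name pixels
instance (name : String) (pixels : List Int) (out : String) : Decidable (Spec_format_cpp_array name pixels out) := by unfold Spec_format_cpp_array; infer_instance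

-- ===== CLAIM (what is proved, stated in full; the proofs are below) =====
def Claim_equal_format_cpp_array : Prop := ∀ (name : String) (pixels : List Int), Dom_format_cpp_array name pixels → Spec_format_cpp_array name pixels (format_cpp_array name pixels)

-- ===== LEMMAS AND PROOFS =====

-- the list of complete 16-element row lines of ps
def pvRows (ps : List Int) : List String :=
  if _h : ps.length < 16 then []
  else pvRowLine ((ps.take 16).map pvFmt04X) :: pvRows (ps.drop 16)
  termination_by ps.length
  decreasing_by simp; omega

lemma pvRows_short (ps : List Int) (h : ps.length < 16) : pvRows ps = [] := by
  rw [pvRows, dif_pos h]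

lemma pvRows_long (ps : List Int) (h : ¬ ps.length < 16) :
    pvRows ps = pvRowLine ((ps.take 16).map pvFmt04X) :: pvRows (ps.drop 16) := by
  rw [pvRows, dif_neg h]

lemma pvMod16 (k : Nat) : PySem.Int.mod ((k : Int) + 1) 16 = (((k + 1) % 16 : Nat) : Int) := by
  simp [PySem.Int.mod, Int.fmod_eq_emod]

lemma pvStepA_flush (out row : List String) (i v : Int) (h : PySem.Int.mod (i + 1) 16 = 0) :
    pvStepA (out, row) (i, v) = (out ++ [pvRowLine (row ++ [pvFmt04X v])], []) := by
  simp only [pvStepA]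
  rw [if_pos h]

lemma pvStepA_keep (out row : List String) (i v : Int) (h : ¬ PySem.Int.mod (i + 1) 16 = 0) :
    pvStepA (out, row) (i, v) = (out, row ++ [pvFmt04X v]) := by
  simp only [pvStepA]
  rw [if_neg h]

-- loop invariant for A's fold: with row.length = k % 16, the fold emits the current
-- row once completed, then one line per further complete chunk; partial rows are dropped
lemma pvLoopA (ps : List Int) (k : Nat) (out row : List String)
    (hrow : row.length = k % 16) :
    ((PySem.List.enumerate ps (k : Int)).foldl pvStepA (out, row)).1 =
    if 16 - k % 16 ≤ ps.length
    then (out ++ [pvRowLine (row ++ ((ps.take (16 - k % 16)).map pvFmt04X))]) ++ pvRows (ps.drop (16 - k % 16))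
    else out := by
  induction ps generalizing k out row with
  | nil =>
    rw [PySem.List.enumerate_nil, List.foldl_nil]
    have hno : ¬ (16 - k % 16 ≤ ([] : List Int).length) := by
      simp only [List.length_nil]
      omega
    rw [if_neg hno]
  | cons v rest ih =>
    rw [PySem.List.enumerate_cons, List.foldl_cons]
    have hc : ((k : Int) + 1) = (((k + 1 : Nat)) : Int) := by push_cast; ring
    by_cases hfl : (k + 1) % 16 = 0
    · -- the row is completed and flushed
      have hk : k % 16 = 15 := by omega
      have hcond : PySem.Int.mod ((k : Int) + 1) 16 = 0 := by rw [pvMod16, hfl]; simp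
      rw [pvStepA_flush out row _ v hcond, hc,
          ih (k + 1) (out ++ [pvRowLine (row ++ [pvFmt04X v])]) [] (by simp [hfl])]
      rw [hfl, hk]
      norm_num
      by_cases hlen : 16 ≤ rest.length
      · rw [if_pos hlen, pvRows_long rest (by omega)]
        simp [List.map_take]
      · rw [if_neg hlen, pvRows_short rest (by omega)]
    · -- the value is appended to the current row
      have hcond : ¬ PySem.Int.mod ((k : Int) + 1) 16 = 0 := by
        rw [pvMod16]; simp; omega
      rw [pvStepA_keep out row _ v hcond, hc,
          ih (k + 1) out (row ++ [pvFmt04X v]) (by simp [hrow]; omega)]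
      have hm : (k + 1) % 16 = k % 16 + 1 := by omega
      set m := 16 - (k + 1) % 16 with hmdef
      have hsucc : 16 - k % 16 = m + 1 := by omega
      rw [hsucc]
      by_cases hlen : m ≤ rest.length
      · rw [if_pos hlen, if_pos (by simp; omega : m + 1 ≤ (v :: rest).length)]
        rw [List.take_succ_cons, List.drop_succ_cons]
        simp
      · rw [if_neg hlen, if_neg (by simp; omega : ¬ (m + 1 ≤ (v :: rest).length))]

-- A's whole loop (started fresh) produces exactly the complete-chunk row lines
lemma pvLoopA_zero (ps : List Int) (out : List String) :
    ((PySem.List.enumerate ps 0).foldl pvStepA (out, [])).1 = out ++ pvRows ps := by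
  have h := pvLoopA ps 0 out [] (by simp)
  norm_num at h
  rw [h]
  by_cases hlen : ps.length < 16
  · rw [if_neg (by omega), pvRows_short ps hlen]
    simp
  · rw [if_pos (by omega), pvRows_long ps hlen]
    simp

-- B's chunk-index range is range (len/16) scaled by 16
lemma pvRange16 (n : Nat) :
    PySem.List.pyRange 0 (16 * PySem.Int.floordiv (n : Int) 16) 16 =
      (List.range (n / 16)).map (fun k => ((16 * k : Nat) : Int)) := by
  have hfd : PySem.Int.floordiv (n : Int) 16 = ((n / 16 : Nat) : Int) := by
    simp [PySem.Int.floordiv, Int.fdiv_eq_ediv]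
  rw [hfd, PySem.List.pyRange_of_pos 0 (16 * ((n / 16 : Nat) : Int)) (by norm_num)]
  by_cases hm : n / 16 = 0
  · simp [hm]
  · have hlt : (0 : Int) < 16 * ((n / 16 : Nat) : Int) := by
      have : 0 < n / 16 := Nat.pos_of_ne_zero hm
      positivity
    rw [if_pos hlt]
    have ht : ((16 * ((n / 16 : Nat) : Int) - 0 + 16 - 1) / 16).toNat = n / 16 := by omega
    rw [ht]
    apply List.map_congr_left
    intro k _
    push_cast; ring

-- B's row list is pvRows
lemma pvRowsB (ps : List Int) :
    ((List.range (ps.length / 16)).map (fun k => ((16 * k : Nat) : Int))).map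
        (fun i => pvRowLine ((PySem.List.slice ps (some i) (some (i + 16))).map pvFmt04X)) = pvRows ps := by
  rw [List.map_map]
  simp only [Function.comp_def]
  induction ps using pvRows.induct with
  | case1 ps h =>
    rw [pvRows_short ps h, Nat.div_eq_of_lt h]
    simp
  | case2 ps h ih =>
    rw [pvRows_long ps h]
    have hlen : ps.length / 16 = (ps.drop 16).length / 16 + 1 := by
      simp only [List.length_drop]; omega
    rw [hlen, List.range_succ_eq_map, List.map_cons, List.map_map]
    congr 1
    · have h16 : (((16 * 0 : Nat) : Int) + 16) = ((16 * 0 : Nat) : Int) + ((16 : Nat) : Int) := by norm_num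
      rw [h16, PySem.List.slice_natCast_add ps (16 * 0) 16]
      simp
    · rw [← ih]
      apply List.map_congr_left
      intro k _
      simp only [Function.comp]
      have e1 : (((16 * (k + 1) : Nat) : Int) + 16) = ((16 * (k + 1) : Nat) : Int) + ((16 : Nat) : Int) := by norm_num
      have e2 : (((16 * k : Nat) : Int) + 16) = ((16 * k : Nat) : Int) + ((16 : Nat) : Int) := by norm_num
      rw [e1, PySem.List.slice_natCast_add ps (16 * (k + 1)) 16,
          e2, PySem.List.slice_natCast_add (ps.drop 16) (16 * k) 16]
      have hidx : List.drop (16 * (k + 1)) ps = List.drop (16 * k) (List.drop 16 ps) := by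
        rw [List.drop_drop]
        congr 1
        omega
      rw [hidx]

-- ===== VERDICT (by name: the statement is the Claim_ definition above) =====
theorem format_cpp_array_spec : Claim_equal_format_cpp_array := by
  unfold Claim_equal_format_cpp_array
  intro name pixels _
  unfold Spec_format_cpp_array format_cpp_array format_cpp_array_alt
  rw [pvLoopA_zero, pvRange16 pixels.length, pvRowsB]
  simp
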